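-- pv_equiv track=rewrite | github.com/recuraki/PythonJunkTest | atcoder/LeetCodeWeekly/242_a.py | countstrs_withIndex
-- ===== SOURCE A (Python) =====
-- import itertools
--
-- def countstrs(s):
--     return [(k, len(list(g))) for k, g in itertools.groupby(s)]
--
-- def countstrs_withIndex(s):
--     d = countstrs(s)
--     r = []
--     ind = 0
--     for i in range(len(d)):
--         r.append((d[i][0], d[i][1], ind))
--         ind += d[i][1]
--     return r
-- ===== SOURCE B (Python) =====
-- def countstrs_withIndex(s):
--     n = len(s)
--     starts = [i for i in range(n) if i == 0 or s[i] != s[i - 1]]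
--     ends = starts[1:] + [n]
--     return [(s[b], e - b, b) for b, e in zip(starts, ends)]
-- ===== Notes on version B (the rewrite author's own statement) =====
-- stated objective: alternative
-- what changed: Instead of groupby plus an offset-accumulation loop, B detects run boundaries (indices i with i==0 or s[i]!=s[i-1]), pairs each boundary with the next one, and reads lengths off as index differences, with no run counter or running offset.
import Mathlib
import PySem

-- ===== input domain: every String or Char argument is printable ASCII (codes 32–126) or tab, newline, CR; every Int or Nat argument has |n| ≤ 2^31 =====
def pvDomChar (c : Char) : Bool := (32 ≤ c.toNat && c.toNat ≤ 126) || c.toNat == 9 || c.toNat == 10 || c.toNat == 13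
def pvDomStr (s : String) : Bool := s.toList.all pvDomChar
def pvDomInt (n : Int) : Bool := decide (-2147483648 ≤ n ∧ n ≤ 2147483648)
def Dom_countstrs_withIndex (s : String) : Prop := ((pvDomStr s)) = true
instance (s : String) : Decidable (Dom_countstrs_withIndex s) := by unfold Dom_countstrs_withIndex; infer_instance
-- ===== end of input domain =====

-- B replaces groupby+offset-accumulation by boundary detection: collect run-start indices, derive lengths as index differences (objective: alternative).


-- ===== PORT A =====
-- itertools.groupby over the characters: each group is (key char, run length).
-- ports "[(k, len(list(g))) for k, g in itertools.groupby(s)]"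
def countstrsA (cs : List Char) : List (String × Int) :=
  match cs with
  | [] => []
  | c :: rest =>
      (String.mk [c], ((rest.takeWhile (· == c)).length : Int) + 1)
        :: countstrsA (rest.dropWhile (· == c))
termination_by cs.length
decreasing_by
  simpa [Nat.lt_succ_iff] using List.length_dropWhile_le (· == c) rest

-- the second loop: "for i in range(len(d)): r.append((d[i][0], d[i][1], ind)); ind += d[i][1]"
def countstrs_withIndex (s : String) : List (String × Int × Int) :=
  let d := countstrsA s.toList
  let r : List (String × Int × Int) := []
  let res := (PySem.List.pyRange 0 (PySem.List.len d) 1).foldl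
    (fun (acc : List (String × Int × Int) × Int) i =>
      let kv := PySem.List.pyGetD d i ("", 0)
      (acc.1 ++ [(kv.1, kv.2, acc.2)], acc.2 + kv.2))
    (r, 0)
  res.1

-- ===== PORT B =====
-- "starts = [i for i in range(n) if i == 0 or s[i] != s[i-1]]"
-- every index accessed is in range (0 <= i-1 < i < n, thanks to the short-circuit), so
-- getD with a default character is exact here.
def bStarts (cs : List Char) : List Nat :=
  (List.range cs.length).filter (fun i => i == 0 || cs.getD i ' ' != cs.getD (i - 1) ' ')

-- "ends = starts[1:] + [n]; return [(s[b], e - b, b) for b, e in zip(starts, ends)]"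
def bOut (cs : List Char) : List (String × Int × Int) :=
  let starts := bStarts cs
  let ends := starts.drop 1 ++ [cs.length]
  (starts.zip ends).map
    (fun be => (String.mk [cs.getD be.1 ' '], ((be.2 : Int) - be.1), (be.1 : Int)))

def countstrs_withIndex_alt (s : String) : List (String × Int × Int) :=
  bOut s.toList

-- ===== PRECONDITION & SPEC =====
def Spec_countstrs_withIndex (s : String) (out : List (String × Int × Int)) : Prop := out = countstrs_withIndex_alt s
instance (s : String) (out : List (String × Int × Int)) : Decidable (Spec_countstrs_withIndex s out) := by unfold Spec_countstrs_withIndex; infer_instance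

-- ===== CLAIM (what is proved, stated in full; the proofs are below) =====
def Claim_equal_countstrs_withIndex : Prop := ∀ (s : String), Dom_countstrs_withIndex s → Spec_countstrs_withIndex s (countstrs_withIndex s)

-- ===== LEMMAS AND PROOFS =====

-- common normal form: groups with start indices, computed by one span-recursion
def grpIdx (cs : List Char) (start : Int) : List (String × Int × Int) :=
  match cs with
  | [] => []
  | c :: rest =>
      (String.mk [c], ((rest.takeWhile (· == c)).length : Int) + 1, start)
        :: grpIdx (rest.dropWhile (· == c))
            (start + ((rest.takeWhile (· == c)).length : Int) + 1)
termination_by cs.length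
decreasing_by
  simpa [Nat.lt_succ_iff] using List.length_dropWhile_le (· == c) rest

-- attaches running offsets to a list of (key, count) pairs
def withIdxP (d : List (String × Int)) (ind : Int) : List (String × Int × Int) :=
  match d with
  | [] => []
  | (k, n) :: t => (k, n, ind) :: withIdxP t (ind + n)

lemma foldl_indexLoop (d : List (String × Int)) (r : List (String × Int × Int)) (ind : Int) :
    (d.foldl (fun (acc : List (String × Int × Int) × Int) (kv : String × Int) =>
        (acc.1 ++ [(kv.1, kv.2, acc.2)], acc.2 + kv.2)) (r, ind)).1
      = r ++ withIdxP d ind := by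
  induction d generalizing r ind with
  | nil => simp [withIdxP]
  | cons kv t ih => simp [withIdxP, ih]

lemma withIdxP_countstrsA (cs : List Char) :
    ∀ start : Int, withIdxP (countstrsA cs) start = grpIdx cs start := by
  induction cs using countstrsA.induct with
  | case1 => intro start; rw [countstrsA, grpIdx.eq_def]; simp [withIdxP]
  | case2 c rest ih =>
      intro start
      rw [countstrsA, grpIdx.eq_def]
      simp only [withIdxP, ih]
      ring_nf

lemma grpIdx_cons (c : Char) (rest : List Char) (start : Int) :
    grpIdx (c :: rest) start
      = (String.mk [c], ((rest.takeWhile (· == c)).length : Int) + 1, start)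
        :: grpIdx (rest.dropWhile (· == c))
            (start + ((rest.takeWhile (· == c)).length : Int) + 1) := by
  rw [grpIdx.eq_def]

lemma portA_eq_grpIdx (s : String) : countstrs_withIndex s = grpIdx s.toList 0 := by
  unfold countstrs_withIndex
  dsimp only
  rw [PySem.List.foldl_pyRange_zero_pyGetD (countstrsA s.toList) ("", (0:Int))
      (fun (acc : List (String × Int × Int) × Int) (kv : String × Int) =>
        (acc.1 ++ [(kv.1, kv.2, acc.2)], acc.2 + kv.2)) ([], 0)]
  rw [foldl_indexLoop, withIdxP_countstrsA]
  simp

-- ----- B side -----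

-- indexing facts on a decomposed list c :: t ++ (rest.dropWhile (· == c)) with t = rest.takeWhile (· == c)
lemma getD_run_le (c : Char) (rest : List Char) (i : Nat)
    (hi : i ≤ (rest.takeWhile (· == c)).length) :
    (c :: rest).getD i ' ' = c := by
  cases i with
  | zero => rfl
  | succ j =>
      have hj : j < (rest.takeWhile (· == c)).length := by omega
      have hjr : j < rest.length :=
        lt_of_lt_of_le hj (List.takeWhile_sublist (· == c)).length_le
      have : rest.getD j ' ' = c := by
        have hget : rest.getD j ' ' = rest[j] := List.getD_eq_getElem rest ' ' hjr
        have hpref : (rest.takeWhile (· == c))[j] = rest[j] :=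
          (List.takeWhile_prefix (· == c)).getElem hj
        have hmem : (rest.takeWhile (· == c))[j] ∈ rest.takeWhile (· == c) :=
          List.getElem_mem hj
        have hp := List.mem_takeWhile_imp hmem
        rw [hget, ← hpref]
        exact eq_of_beq hp
      simpa [List.getD_cons_succ] using this

lemma getD_append_right' (t d : List Char) (j : Nat) (x : Char) :
    (t ++ d).getD (t.length + j) x = d.getD j x := by
  rw [List.getD_eq_getElem?_getD, List.getD_eq_getElem?_getD,
    List.getElem?_append_right (by omega)]
  simp

lemma getD_run_right (c : Char) (rest : List Char) (j : Nat) :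
    (c :: rest).getD ((rest.takeWhile (· == c)).length + 1 + j) ' '
      = (rest.dropWhile (· == c)).getD j ' ' := by
  rw [show (rest.takeWhile (· == c)).length + 1 + j
        = ((rest.takeWhile (· == c)).length + j) + 1 by omega,
     List.getD_cons_succ]
  have h := getD_append_right' (rest.takeWhile (· == c)) (rest.dropWhile (· == c)) j ' '
  rwa [List.takeWhile_append_dropWhile] at h

-- head of the dropWhile part fails the predicate
lemma dropWhile_head_false {p : Char → Bool} {l : List Char} {x : Char} {xs : List Char}
    (h : l.dropWhile p = x :: xs) : p x = false := by
  induction l with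
  | nil => simp [List.dropWhile] at h
  | cons a t ih =>
      by_cases hp : p a
      · exact ih (by simpa [List.dropWhile, hp] using h)
      · rw [List.dropWhile_cons_of_neg (by simpa using hp)] at h
        cases h; simpa using hp

-- run-start indices of c :: rest: 0, then those of the tail block, shifted by the run length
lemma bStarts_cons (c : Char) (rest : List Char) :
    bStarts (c :: rest)
      = 0 :: (bStarts (rest.dropWhile (· == c))).map
          (· + ((rest.takeWhile (· == c)).length + 1)) := by
  have hrest : rest.length = (rest.takeWhile (· == c)).length + (rest.dropWhile (· == c)).length := by
    have h := congrArg List.length (List.takeWhile_append_dropWhile (p := (· == c)) (l := rest))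
    rw [List.length_append] at h
    omega
  have hlen : (c :: rest).length = ((rest.takeWhile (· == c)).length + 1) + (rest.dropWhile (· == c)).length := by
    rw [List.length_cons, hrest]; omega
  unfold bStarts
  rw [hlen, List.range_add, List.filter_append]
  have h1 : (List.range ((rest.takeWhile (· == c)).length + 1)).filter
      (fun i => i == 0 || (c :: rest).getD i ' ' != (c :: rest).getD (i - 1) ' ') = [0] := by
    rw [List.range_succ_eq_map, List.filter_cons]
    simp only [beq_self_eq_true, Bool.true_or, if_true]
    have hnil : (List.map Nat.succ (List.range (rest.takeWhile (· == c)).length)).filter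
        (fun i => i == 0 || (c :: rest).getD i ' ' != (c :: rest).getD (i - 1) ' ') = [] := by
      rw [List.filter_eq_nil_iff]
      intro a ha
      obtain ⟨j, hj, rfl⟩ := List.mem_map.mp ha
      have hjm : j < (rest.takeWhile (· == c)).length := List.mem_range.mp hj
      have e1 : (c :: rest).getD (j + 1) ' ' = c := getD_run_le c rest (j + 1) (by omega)
      have e2 : (c :: rest).getD j ' ' = c := getD_run_le c rest j (by omega)
      have e1' : rest[j]?.getD ' ' = c := by
        simpa [List.getD_cons_succ, List.getD_eq_getElem?_getD] using e1
      have e2' : (c :: rest)[j]?.getD ' ' = c := by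
        simpa [List.getD_eq_getElem?_getD] using e2
      simp [Nat.succ_eq_add_one, List.getD_eq_getElem?_getD, e1', e2']
    rw [hnil]
  have h2 : ∀ j ∈ List.range (rest.dropWhile (· == c)).length,
      ((fun i => i == 0 || (c :: rest).getD i ' ' != (c :: rest).getD (i - 1) ' ')
          ∘ (fun x => ((rest.takeWhile (· == c)).length + 1) + x)) j
        = (fun i => i == 0 || (rest.dropWhile (· == c)).getD i ' ' != (rest.dropWhile (· == c)).getD (i - 1) ' ') j := by
    intro j hj
    have hjd : j < (rest.dropWhile (· == c)).length := List.mem_range.mp hj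
    have e1 : (c :: rest).getD (((rest.takeWhile (· == c)).length + 1) + j) ' ' = (rest.dropWhile (· == c)).getD j ' ' := by
      have h' := getD_run_right c rest j
      rwa [show ((rest.takeWhile (· == c)).length + 1) + j = (rest.takeWhile (· == c)).length + 1 + j by omega]
    cases j with
    | zero =>
        have hdc : (rest.dropWhile (· == c)) ≠ [] := by intro h; rw [h] at hjd; simp at hjd
        obtain ⟨x, xs, hx⟩ := List.exists_cons_of_ne_nil hdc
        have hxf : ((fun y => y == c) x) = false := dropWhile_head_false (p := fun y => y == c) hx
        have e2 : (c :: rest).getD (((rest.takeWhile (· == c)).length + 1) + 0 - 1) ' ' = c := by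
          rw [show ((rest.takeWhile (· == c)).length + 1) + 0 - 1 = (rest.takeWhile (· == c)).length by omega]
          exact getD_run_le c rest (rest.takeWhile (· == c)).length le_rfl
        have ed : (rest.dropWhile (· == c)).getD 0 ' ' = x := by rw [hx]; rfl
        have hne : ¬ (x = c) := by simpa using hxf
        simp only [Function.comp_apply, e1, e2, ed]
        simp [hne]
    | succ j' =>
        have e2 : (c :: rest).getD (((rest.takeWhile (· == c)).length + 1) + (j' + 1) - 1) ' ' = (rest.dropWhile (· == c)).getD j' ' ' := by
          have h' := getD_run_right c rest j'
          rwa [show ((rest.takeWhile (· == c)).length + 1) + (j' + 1) - 1 = (rest.takeWhile (· == c)).length + 1 + j' by omega]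
        simp only [Function.comp_apply, e1, e2]
        simp
  have hsecond : ((List.range (rest.dropWhile (· == c)).length).map (fun x => ((rest.takeWhile (· == c)).length + 1) + x)).filter
      (fun i => i == 0 || (c :: rest).getD i ' ' != (c :: rest).getD (i - 1) ' ')
      = (bStarts (rest.dropWhile (· == c))).map (· + ((rest.takeWhile (· == c)).length + 1)) := by
    rw [List.filter_map, List.filter_congr h2]
    unfold bStarts
    apply List.map_congr_left
    intro a _
    simp [Nat.add_comm]
  rw [h1, hsecond]
  simp only [List.singleton_append]
  rfl

-- bStarts of a nonempty list starts with 0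
lemma bStarts_head (x : Char) (xs : List Char) :
    ∃ S', bStarts (x :: xs) = 0 :: S' := by
  refine ⟨(List.map Nat.succ (List.range xs.length)).filter
      (fun i => i == 0 || (x :: xs).getD i ' ' != (x :: xs).getD (i - 1) ' '), ?_⟩
  unfold bStarts
  rw [show (x :: xs).length = xs.length + 1 from rfl, List.range_succ_eq_map, List.filter_cons]
  simp only [beq_self_eq_true, Bool.true_or, if_true]

lemma bOut_nil : bOut [] = [] := by
  unfold bOut bStarts
  simp

-- peel one run off B's output
lemma bOut_cons (c : Char) (rest : List Char) :
    bOut (c :: rest)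
      = (String.mk [c], ((rest.takeWhile (· == c)).length : Int) + 1, 0)
        :: (bOut (rest.dropWhile (· == c))).map
            (fun p => (p.1, p.2.1, p.2.2 + (((rest.takeWhile (· == c)).length : Int) + 1))) := by
  have hrest : rest.length = (rest.takeWhile (· == c)).length + (rest.dropWhile (· == c)).length := by
    have h := congrArg List.length (List.takeWhile_append_dropWhile (p := (· == c)) (l := rest))
    rw [List.length_append] at h
    omega
  have hlen : (c :: rest).length = ((rest.takeWhile (· == c)).length + 1) + (rest.dropWhile (· == c)).length := by
    rw [List.length_cons, hrest]; omega
  have hB : bStarts (c :: rest) = 0 :: (bStarts (rest.dropWhile (· == c))).map (· + ((rest.takeWhile (· == c)).length + 1)) := by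
    have h' := bStarts_cons c rest
    exact h'
  have hget : ∀ b : Nat, (c :: rest).getD (b + ((rest.takeWhile (· == c)).length + 1)) ' ' = (rest.dropWhile (· == c)).getD b ' ' := by
    intro b
    have h' := getD_run_right c rest b
    rwa [show b + ((rest.takeWhile (· == c)).length + 1) = (rest.takeWhile (· == c)).length + 1 + b by omega]
  have e0 : (c :: rest).getD 0 ' ' = c := rfl
  unfold bOut
  rw [hB, hlen]
  cases hdd : (rest.dropWhile (· == c)) with
  | nil =>
      simp [bStarts]
  | cons x xs =>
      obtain ⟨S', hS0⟩ := bStarts_head x xs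
      have hget' : ∀ b : Nat, (c :: rest).getD (b + ((rest.takeWhile (· == c)).length + 1)) ' '
          = (x :: xs).getD b ' ' := by
        intro b
        rw [← hdd]; exact hget b
      rw [hS0]
      -- starts = 0 :: map f (0 :: S'); ends = map f (0 :: S') ++ [((rest.takeWhile (· == c)).length+1)+k] = map f ((0::S')++[k])
      have hkey :
          ((0 :: ((0 : Nat) :: S').map (· + ((rest.takeWhile (· == c)).length + 1))).zip
              (((0 :: ((0 : Nat) :: S').map (· + ((rest.takeWhile (· == c)).length + 1))).drop 1) ++ [((rest.takeWhile (· == c)).length + 1) + (x :: xs).length]))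
            = (0, 0 + ((rest.takeWhile (· == c)).length + 1))
              :: ((((0 : Nat) :: S').zip ((S' ++ [(x :: xs).length]))).map
                  (Prod.map (· + ((rest.takeWhile (· == c)).length + 1)) (· + ((rest.takeWhile (· == c)).length + 1)))) := by
        rw [List.drop_succ_cons, List.drop_zero]
        rw [show (((0 : Nat) :: S').map (· + ((rest.takeWhile (· == c)).length + 1))) ++ [((rest.takeWhile (· == c)).length + 1) + (x :: xs).length]
              = ((0 :: (S' ++ [(x :: xs).length])).map (· + ((rest.takeWhile (· == c)).length + 1))) by simp [Nat.add_comm]]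
        rw [List.map_cons (l := S' ++ [(x :: xs).length])]
        rw [List.zip_cons_cons, List.zip_map]
      dsimp only
      rw [hkey]
      rw [List.map_cons, List.map_map]
      congr 1
      · simp
      · -- tail: the zip on the right is exactly bOut (x :: xs)'s zip (already unfolded)
        simp only [List.drop_succ_cons, List.drop_zero]
        rw [List.map_map]
        apply List.map_congr_left
        intro a _
        simp only [Function.comp_apply, Prod.map]
        refine Prod.ext ?_ (Prod.ext ?_ ?_)
        · simpa using congrArg (fun ch => String.mk [ch]) (hget' a.1)
        · simp
        · simp

lemma grpIdx_shift (cs : List Char) :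
    ∀ a : Int, grpIdx cs a = (grpIdx cs 0).map (fun p => (p.1, p.2.1, p.2.2 + a)) := by
  induction cs using countstrsA.induct with
  | case1 => intro a; rw [grpIdx.eq_def]; rw [grpIdx.eq_def]; simp
  | case2 c rest ih =>
      intro a
      rw [grpIdx_cons, grpIdx_cons]
      simp only [List.map_cons]
      congr 1
      · simp
      · rw [ih, ih (0 + ((rest.takeWhile (· == c)).length : Int) + 1)]
        rw [List.map_map]
        apply List.map_congr_left
        intro p _
        simp only [Function.comp_apply]
        refine Prod.ext rfl (Prod.ext rfl ?_)
        simp; ring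

lemma portB_eq_grpIdx (cs : List Char) : bOut cs = grpIdx cs 0 := by
  induction cs using countstrsA.induct with
  | case1 => rw [grpIdx.eq_def]; exact bOut_nil
  | case2 c rest ih =>
      rw [bOut_cons, grpIdx_cons, ih,
        grpIdx_shift (rest.dropWhile (· == c))
          (0 + ((rest.takeWhile (· == c)).length : Int) + 1)]
      congr 1
      apply List.map_congr_left
      intro p _
      refine Prod.ext rfl (Prod.ext rfl ?_)
      simp

-- ===== VERDICT (by name: the statement is the Claim_ definition above) =====
theorem countstrs_withIndex_spec : Claim_equal_countstrs_withIndex := by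
  intro s _
  unfold Spec_countstrs_withIndex
  rw [portA_eq_grpIdx]
  unfold countstrs_withIndex_alt
  rw [portB_eq_grpIdx]
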